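-- pv_equiv track=rewrite | github.com/gqmelo/misc | algorithms/chapter_08_dynamic_programming/q011_coins.py | get_coins
-- ===== SOURCE A (Python) =====
-- def get_coins(value, possible_coins):
--     if value < 0:
--         raise ValueError()
--     if value == 0:
--         return [[]]
--     all_coins = []
--     for i, c in enumerate(possible_coins):
--         if c > value:
--             continue
--         remaining = possible_coins[i:]
--         all_coins.extend([[c] + coins for coins in
--                           get_coins(value - c, remaining)])
--     return all_coins
-- ===== SOURCE B (Python) =====
-- def get_coins(value, possible_coins):
--     if value < 0:
--         raise ValueError()
--     results = []
--     stack = [(value, possible_coins, [])]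
--     while stack:
--         remaining, coins, path = stack.pop()
--         if remaining == 0:
--             results.append(path)
--             continue
--         children = [(remaining - coins[i], coins[i:], path + [coins[i]])
--                     for i in range(len(coins)) if coins[i] <= remaining]
--         stack.extend(reversed(children))
--     return results
-- ===== Notes on version B (the rewrite author's own statement) =====
-- stated objective: alternative
-- what changed: The recursive enumeration (recursion on value with list slices, extending an accumulator per call) is replaced by an iterative backtracking loop over an explicit stack of (remaining, coin-suffix, path) frames, pushing children in reverse so they pop in A's DFS order.
import Mathlib
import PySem

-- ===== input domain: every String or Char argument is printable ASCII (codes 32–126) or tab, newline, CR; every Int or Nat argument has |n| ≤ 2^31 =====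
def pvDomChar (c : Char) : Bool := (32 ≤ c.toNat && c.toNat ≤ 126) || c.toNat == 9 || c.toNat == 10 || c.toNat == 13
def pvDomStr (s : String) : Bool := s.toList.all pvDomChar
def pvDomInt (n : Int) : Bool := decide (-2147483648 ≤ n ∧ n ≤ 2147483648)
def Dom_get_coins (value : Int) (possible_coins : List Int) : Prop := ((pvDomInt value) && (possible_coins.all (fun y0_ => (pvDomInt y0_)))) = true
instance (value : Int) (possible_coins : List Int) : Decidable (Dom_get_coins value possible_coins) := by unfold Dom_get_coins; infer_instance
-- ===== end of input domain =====

-- B replaces A's recursion by an iterative backtracking loop over an explicit stack of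
-- (remaining, coin-suffix, path) frames (children pushed in reverse so they pop in A's order);
-- return values agree on Pre_. Objective: alternative (same exponential cost, different structure).

-- ===== PORT A =====
-- the 'for i, c in enumerate(possible_coins)' body: each iteration sees c and the slice
-- possible_coins[i:] = c :: tl, so it is transcribed as structural recursion over suffixes.
def aLoop (rec : Int → List Int → List (List Int)) (v : Int) : List Int → List (List Int)
  | [] => []
  | c :: tl =>
      (if c > v then [] else (rec (v - c) (c :: tl)).map (fun coins => c :: coins))
        ++ aLoop rec v tl

-- fueled transcription of the recursive Python function; fuel value.toNat + 1 bounds the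
-- recursion depth on every input admitted by Pre_ (each call strictly decreases value).
def get_coinsF : Nat → Int → List Int → List (List Int)
  | 0, _, _ => []                      -- fuel exhaustion: unreachable under Pre_
  | f+1, v, coins =>
      if v < 0 then []                 -- Python raises ValueError here; excluded by Pre_
      else if v = 0 then [[]]
      else aLoop (get_coinsF f) v coins

def get_coins (value : Int) (possible_coins : List Int) : List (List Int) :=
  get_coinsF (value.toNat + 1) value possible_coins

-- ===== PORT B =====
-- a frame is (fuel, remaining, coins-suffix, path); fuel is the port's totalization device.
-- the comprehension '[(remaining - coins[i], coins[i:], path + [coins[i]]) for i in range(len(coins)) if coins[i] <= remaining]':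
-- iteration i sees coins[i] = c and coins[i:] = c :: tl, so again structural recursion over suffixes.
def bChildren (f : Nat) (r : Int) (p : List Int) : List Int → List (Nat × Int × List Int × List Int)
  | [] => []
  | c :: tl =>
      (if c ≤ r then [(f, r - c, c :: tl, p ++ [c])] else []) ++ bChildren f r p tl

def pvFrameW (fr : Nat × Int × List Int × List Int) : Nat := (fr.2.2.1.length + 1) ^ fr.1

-- termination lemma for runB: total weight of the children of one frame
theorem bChildren_wsum (f : Nat) (r : Int) (p : List Int) (N : Nat) :
    ∀ cs : List Int, cs.length ≤ N →
      ((bChildren f r p cs).map pvFrameW).sum ≤ cs.length * (N + 1) ^ f := by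
  intro cs
  induction cs with
  | nil => intro _; simp [bChildren]
  | cons c tl ih =>
      intro hlen
      simp only [bChildren, List.map_append, List.sum_append, List.length_cons]
      have htl : ((bChildren f r p tl).map pvFrameW).sum ≤ tl.length * (N + 1) ^ f :=
        ih (by simpa using Nat.le_of_succ_le hlen)
      have hhead : ((if c ≤ r then [(f, r - c, c :: tl, p ++ [c])] else []).map pvFrameW).sum
          ≤ (N + 1) ^ f := by
        split
        · simpa [pvFrameW] using Nat.pow_le_pow_left (by simpa using hlen) f
        · simp
      calc ((if c ≤ r then [(f, r - c, c :: tl, p ++ [c])] else []).map pvFrameW).sum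
            + ((bChildren f r p tl).map pvFrameW).sum
          ≤ (N + 1) ^ f + tl.length * (N + 1) ^ f := Nat.add_le_add hhead htl
        _ = (tl.length + 1) * (N + 1) ^ f := by ring

-- Python B's 'while stack' loop: stack top is the list head ('stack.pop()' pops the last
-- element and 'stack.extend(reversed(children))' makes the first child the next pop, which
-- is exactly consing the children in order).
def runB : List (Nat × Int × List Int × List Int) → List (List Int) → List (List Int)
  | [], results => results
  | (f, r, cs, p) :: rest, results =>
      if r = 0 then runB rest (results ++ [p])
      else
        match f with
        | 0 => runB rest results       -- fuel exhaustion: unreachable under Pre_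
        | f' + 1 => runB (bChildren f' r p cs ++ rest) results
termination_by stack _ => (stack.map pvFrameW).sum
decreasing_by
  · have h : 1 ≤ pvFrameW (f, r, cs, p) := Nat.one_le_pow _ _ (by omega)
    simp only [List.map_cons, List.sum_cons]
    omega
  · have h : 1 ≤ pvFrameW (0, r, cs, p) := Nat.one_le_pow _ _ (by omega)
    simp only [List.map_cons, List.sum_cons]
    omega
  · simp only [List.map_cons, List.sum_cons, List.map_append, List.sum_append]
    have h1 : ((bChildren f' r p cs).map pvFrameW).sum ≤ cs.length * (cs.length + 1) ^ f' :=
      bChildren_wsum f' r p cs.length cs le_rfl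
    have h2 : pvFrameW (f'.succ, r, cs, p) = (cs.length + 1) * (cs.length + 1) ^ f' := by
      simp [pvFrameW, pow_succ, Nat.mul_comm]
    have h3 : 0 < (cs.length + 1) ^ f' := Nat.pow_pos (by omega)
    have h4 : cs.length * (cs.length + 1) ^ f' < (cs.length + 1) * (cs.length + 1) ^ f' :=
      mul_lt_mul_of_pos_right (Nat.lt_succ_self _) h3
    omega

def get_coins_alt (value : Int) (possible_coins : List Int) : List (List Int) :=
  if value < 0 then []                 -- Python raises ValueError here; excluded by Pre_
  else runB [(value.toNat, value, possible_coins, [])] []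

-- ===== PRECONDITION & SPEC =====
-- Pre_ admits exactly the inputs on which Python A returns: value < 0 raises ValueError, and
-- for value > 0 a nonpositive coin makes both Pythons recurse/loop forever (A never returns).
def Pre_get_coins (value : Int) (possible_coins : List Int) : Prop :=
  0 ≤ value ∧ (value = 0 ∨ ∀ c ∈ possible_coins, 0 < c)
instance (value : Int) (possible_coins : List Int) : Decidable (Pre_get_coins value possible_coins) := by
  unfold Pre_get_coins; infer_instance
def pvWitness_get_coins : Int × List Int := (4, [1, 2, 3])

def Spec_get_coins (value : Int) (possible_coins : List Int) (out : List (List Int)) : Prop := out = get_coins_alt value possible_coins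
instance (value : Int) (possible_coins : List Int) (out : List (List Int)) : Decidable (Spec_get_coins value possible_coins out) := by unfold Spec_get_coins; infer_instance

-- ===== CLAIM (what is proved, stated in full; the proofs are below) =====
def Claim_equal_get_coins : Prop := ∀ (value : Int) (possible_coins : List Int), Dom_get_coins value possible_coins → Pre_get_coins value possible_coins → Spec_get_coins value possible_coins (get_coins value possible_coins)

-- ===== LEMMAS AND PROOFS =====

-- contribution of one stack frame to B's final result, phrased through A's fueled function
def contrib (fr : Nat × Int × List Int × List Int) : List (List Int) :=
  (get_coinsF (fr.1 + 1) fr.2.1 fr.2.2.1).map (fun out => fr.2.2.2 ++ out)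

def frameInv (fr : Nat × Int × List Int × List Int) : Prop :=
  0 ≤ fr.2.1 ∧ fr.2.1.toNat ≤ fr.1 ∧ ∀ c ∈ fr.2.2.1, 0 < c

theorem child_flat (f' : Nat) (r : Int) (p : List Int) :
    ∀ cs : List Int,
      (bChildren f' r p cs).flatMap contrib
        = (aLoop (get_coinsF (f' + 1)) r cs).map (fun out => p ++ out) := by
  intro cs
  induction cs with
  | nil => simp [bChildren, aLoop]
  | cons c tl ih =>
      simp only [bChildren, aLoop, List.flatMap_append, List.map_append, ih]
      congr 1
      by_cases h : c ≤ r
      · rw [if_pos h, if_neg (by omega)]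
        simp [contrib, List.map_map, Function.comp]
      · rw [if_neg h, if_pos (by omega)]
        simp
theorem bChildren_mem_inv (f : Nat) (r : Int) (p : List Int)
    (hr : 0 ≤ r) (hf : r.toNat ≤ f + 1) :
    ∀ cs : List Int, (∀ c ∈ cs, 0 < c) →
      ∀ fr ∈ bChildren f r p cs, frameInv fr := by
  intro cs
  induction cs with
  | nil => intro _ fr h; simp [bChildren] at h
  | cons c tl ih =>
      intro hpos fr hmem
      simp only [bChildren, List.mem_append] at hmem
      rcases hmem with hmem | hmem
      · have hc : 0 < c := hpos c (by simp)
        by_cases h : c ≤ r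
        · rw [if_pos h] at hmem
          simp only [List.mem_singleton] at hmem
          subst hmem
          refine ⟨by simpa using h, by simp; omega, ?_⟩
          intro x hx; exact hpos x hx
        · rw [if_neg h] at hmem; simp at hmem
      · exact ih (fun x hx => hpos x (List.mem_cons_of_mem _ hx)) fr hmem

theorem runB_flat :
    ∀ (stack : List (Nat × Int × List Int × List Int)) (results : List (List Int)),
      (∀ fr ∈ stack, frameInv fr) →
      runB stack results = results ++ stack.flatMap contrib := by
  intro stack results
  induction stack, results using runB.induct with
  | case1 results => intro _; simp [runB]
  | case2 f cs p rest results ih =>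
      intro hinv
      have hrest : ∀ fr ∈ rest, frameInv fr :=
        fun fr hm => hinv fr (List.mem_cons_of_mem _ hm)
      have step : runB ((f, (0 : Int), cs, p) :: rest) results = runB rest (results ++ [p]) := by
        rw [runB.eq_def]; dsimp only; rw [if_pos rfl]
      rw [step, ih hrest]
      simp [contrib, get_coinsF, List.append_assoc]
  | case3 r cs p rest results h ih =>
      intro hinv
      exfalso
      obtain ⟨h1, h2, -⟩ := hinv (0, r, cs, p) (List.mem_cons_self)
      simp only at h1 h2
      omega
  | case4 r cs p rest results h f' ih =>
      intro hinv
      obtain ⟨h1, h2, h3⟩ := hinv (f'.succ, r, cs, p) (List.mem_cons_self)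
      simp only at h1 h2 h3
      have hall : ∀ fr ∈ bChildren f' r p cs ++ rest, frameInv fr := by
        intro fr hm
        rcases List.mem_append.mp hm with hm | hm
        · exact bChildren_mem_inv f' r p h1 h2 cs h3 fr hm
        · exact hinv fr (List.mem_cons_of_mem _ hm)
      rw [runB, if_neg h, ih hall]
      have hv : get_coinsF (f' + 1 + 1) r cs = aLoop (get_coinsF (f' + 1)) r cs := by
        rw [get_coinsF, if_neg (by omega), if_neg h]
      simp [contrib, hv, child_flat]

-- ===== VERDICT (by name: the statement is the Claim_ definition above) =====
theorem get_coins_spec : Claim_equal_get_coins := by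
  intro value possible_coins _ hpre
  rcases hpre with ⟨hv, hcase⟩
  unfold Spec_get_coins get_coins get_coins_alt
  rw [if_neg (by omega)]
  rcases hcase with rfl | hpos
  · simp [get_coinsF, runB]
  · rw [runB_flat [(value.toNat, value, possible_coins, [])] []
      (by intro fr h; simp at h; subst h; exact ⟨hv, le_rfl, hpos⟩)]
    simp [contrib]
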